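-- pv_equiv track=rewrite | github.com/geoffreyweal/ReJig | ReJig/ReJig_Atoms/write_molecules_to_disk_methods/write_methods/shared_methods.py | input_commands_for_multiwfn
-- ===== SOURCE A (Python) =====
-- no_preset_vdW_radius = {'Br': 1.75}
--
-- def input_commands_for_multiwfn(wfn_filename='output.wfn',molecule_symbols=[]):
-- 	"""
-- 	This method is designed to provide the commands for performing the ATC calculations in Multiwfn.
--
-- 	Parameters
-- 	----------
-- 	wfn_filename : str.
-- 		This is the name of the wfn file
-- 	molecule_symbols : list of str.
-- 		This list contains all the elements in the molecule.
--
-- 	Returns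
-- 	-------
-- 	Returns a string of the commands needed to run Multiwfn in the terminal. This is required to run Multiwfn in slurm to perform atomic transition charge (ATC) calculations using the output.wfn file created with Gaussian.
-- 	"""
--
-- 	# First, obtain the commands needed to run ATC calculations in Multiwfn in the terminal.
-- 	multiwfn_echo_commands = [7,12,5,3,1]
-- 	for element in sorted(set(molecule_symbols)):
-- 		if element in no_preset_vdW_radius.keys():
-- 			#multiwfn_echo_commands.append(no_preset_vdW_radius[element])
-- 			multiwfn_echo_commands.append('')
-- 	multiwfn_echo_commands += ['y',0,0,'q']
-- 	multiwfn_echo_commands = [str(command) for command in multiwfn_echo_commands]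
-- 	multiwfn_echo_commands = '\\n'.join(multiwfn_echo_commands)
--
-- 	# Second, get the string to run in the terminal
-- 	multiwfn_commands = 'echo -e "'+str(multiwfn_echo_commands)+'" | Multiwfn '+str(wfn_filename)
--
-- 	# Third, return the command string to run ATC calculations in Multiwfn in the terminal.
-- 	return multiwfn_commands
-- ===== SOURCE B (Python) =====
-- no_preset_vdW_radius = {'Br': 1.75}
--
-- def input_commands_for_multiwfn(wfn_filename='output.wfn', molecule_symbols=[]):
--     # The only element without a preset vdW radius is 'Br', so the echo payload is one of
--     # exactly two fixed command strings, selected by a single membership test: no set,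
--     # no sorting, no loop, no counting, no list assembly or join.
--     if 'Br' in molecule_symbols:
--         body = '7\\n12\\n5\\n3\\n1\\n\\ny\\n0\\n0\\nq'
--     else:
--         body = '7\\n12\\n5\\n3\\n1\\ny\\n0\\n0\\nq'
--     return 'echo -e "' + body + '" | Multiwfn ' + wfn_filename
-- ===== Notes on version B (the rewrite author's own statement) =====
-- stated objective: simpler
-- what changed: Since the module constant no_preset_vdW_radius has a single key, B replaces A's sorted-set loop, per-element append, str() map and join with one membership test over the input list that selects between two precomputed echo payload strings.
import Mathlib
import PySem

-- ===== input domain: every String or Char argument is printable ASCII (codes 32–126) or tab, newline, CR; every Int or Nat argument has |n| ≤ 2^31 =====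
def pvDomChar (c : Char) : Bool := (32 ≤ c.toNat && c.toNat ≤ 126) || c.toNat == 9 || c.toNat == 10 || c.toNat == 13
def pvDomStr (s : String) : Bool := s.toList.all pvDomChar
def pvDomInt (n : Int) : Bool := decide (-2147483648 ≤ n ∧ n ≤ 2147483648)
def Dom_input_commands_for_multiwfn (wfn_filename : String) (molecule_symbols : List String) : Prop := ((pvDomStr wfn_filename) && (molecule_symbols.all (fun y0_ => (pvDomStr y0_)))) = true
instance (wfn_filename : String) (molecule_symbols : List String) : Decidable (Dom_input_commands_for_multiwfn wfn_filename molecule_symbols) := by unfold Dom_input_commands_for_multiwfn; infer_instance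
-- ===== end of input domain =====

-- B exploits that the fixed dict has the single key 'Br': one membership test selects between
-- two precomputed command strings, replacing A's sorted-set loop/append/map/join (objective: simpler).

-- ===== PORT A =====
-- module constant no_preset_vdW_radius = {'Br': 1.75}: only its KEYS are ever read
-- (the float 1.75 is never used), so we carry the key list.
def no_preset_vdW_radius_keys : List String := ["Br"]

def input_commands_for_multiwfn (wfn_filename : String) (molecule_symbols : List String) : String :=
  -- the Python list starts with ints [7,12,5,3,1]; every element is passed through str()
  -- before any other use, so we carry the str() images ("7",… — exact) from the start.
  let cmds0 : List String := ["7", "12", "5", "3", "1"]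
  -- for element in sorted(set(molecule_symbols)): if element in no_preset_vdW_radius.keys(): append('')
  let cmds1 := (PySem.List.sorted (PySem.Set.ofList molecule_symbols) (fun x => x) false).foldl
      (fun acc element => if no_preset_vdW_radius_keys.contains element then acc ++ [""] else acc) cmds0
  let cmds2 := cmds1 ++ ["y", "0", "0", "q"]
  -- [str(command) for command in …] : identity on the carried strings
  let cmds3 := cmds2.map (fun command => command)
  let echo := PySem.Str.join "\\n" cmds3
  "echo -e \"" ++ echo ++ "\" | Multiwfn " ++ wfn_filename

-- ===== PORT B =====
def input_commands_for_multiwfn_alt (wfn_filename : String) (molecule_symbols : List String) : String :=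
  let body := if molecule_symbols.contains "Br"
    then "7\\n12\\n5\\n3\\n1\\n\\ny\\n0\\n0\\nq"
    else "7\\n12\\n5\\n3\\n1\\ny\\n0\\n0\\nq"
  "echo -e \"" ++ body ++ "\" | Multiwfn " ++ wfn_filename

-- ===== PRECONDITION & SPEC =====
def Spec_input_commands_for_multiwfn (wfn_filename : String) (molecule_symbols : List String) (out : String) : Prop := out = input_commands_for_multiwfn_alt wfn_filename molecule_symbols
instance (wfn_filename : String) (molecule_symbols : List String) (out : String) : Decidable (Spec_input_commands_for_multiwfn wfn_filename molecule_symbols out) := by unfold Spec_input_commands_for_multiwfn; infer_instance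

-- ===== CLAIM =====
def Claim_equal_input_commands_for_multiwfn : Prop := ∀ (wfn_filename : String) (molecule_symbols : List String), Dom_input_commands_for_multiwfn wfn_filename molecule_symbols → Spec_input_commands_for_multiwfn wfn_filename molecule_symbols (input_commands_for_multiwfn wfn_filename molecule_symbols)

-- ===== LEMMAS AND PROOFS =====

-- a Nodup list whose members are exactly {a} is the singleton [a]
lemma eq_singleton_of_nodup_mem {α : Type} (l : List α) (a : α) (hn : l.Nodup)
    (hm : ∀ x, x ∈ l ↔ x = a) : l = [a] := by
  cases l with
  | nil => exact absurd ((hm a).2 rfl) (by simp)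
  | cons b t =>
    have hb : b = a := (hm b).1 (List.mem_cons_self ..)
    subst hb
    have ht : t = [] := by
      apply List.eq_nil_iff_forall_not_mem.2
      intro x hx
      have hxb : x = b := (hm x).1 (List.mem_cons_of_mem _ hx)
      subst hxb
      exact (List.nodup_cons.1 hn).1 hx
    rw [ht]

-- A's filtered sorted set: the elements of sorted(set(ms)) lying in ["Br"] are exactly
-- ["Br"] when "Br" ∈ ms, else [].
lemma filter_sorted_set (ms : List String) :
    (PySem.List.sorted (PySem.Set.ofList ms) (fun x => x) false).filter
      (fun e => no_preset_vdW_radius_keys.contains e)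
    = if "Br" ∈ ms then ["Br"] else [] := by
  have hmem : ∀ x, x ∈ PySem.List.sorted (PySem.Set.ofList ms) (fun x => x) false ↔ x ∈ ms := by
    intro x; rw [PySem.List.mem_sorted, PySem.Set.mem_ofList]
  have hnodup : (PySem.List.sorted (PySem.Set.ofList ms) (fun x => x) false).Nodup :=
    (PySem.List.sorted_perm ..).nodup_iff.2 (PySem.Set.nodup_ofList ms)
  by_cases h : "Br" ∈ ms
  · rw [if_pos h]
    refine eq_singleton_of_nodup_mem _ _ (hnodup.filter _) ?_
    intro x
    simp only [List.mem_filter, hmem, no_preset_vdW_radius_keys]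
    constructor
    · rintro ⟨-, hc⟩
      simpa using hc
    · rintro rfl; exact ⟨h, by simp⟩
  · rw [if_neg h]
    apply List.filter_eq_nil_iff.2
    intro x hx hc
    have : x = "Br" := by simpa [no_preset_vdW_radius_keys] using hc
    exact h (this ▸ (hmem x).1 hx)

-- ===== VERDICT =====
theorem input_commands_for_multiwfn_spec : Claim_equal_input_commands_for_multiwfn := by
  intro wfn ms _
  unfold Spec_input_commands_for_multiwfn input_commands_for_multiwfn input_commands_for_multiwfn_alt
  have hfold := PySem.List.foldl_append_if
    (fun element => no_preset_vdW_radius_keys.contains element) (fun _ => "")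
    (PySem.List.sorted (PySem.Set.ofList ms) (fun x => x) false) ["7", "12", "5", "3", "1"]
  simp only [hfold, filter_sorted_set]
  by_cases h : "Br" ∈ ms
  · rw [if_pos h, if_pos (by simpa using h : ms.contains "Br" = true)]
    rfl
  · rw [if_neg h, if_neg (by simpa using h : ¬ ms.contains "Br" = true)]
    rfl
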